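-- pv_equiv track=rewrite | github.com/anhvth/openpifpaf | scripts/create_parking_line_dataset.py | process
-- ===== SOURCE A (Python) =====
-- def process(box):
--     out = []
--     for i in range(len(box)):
--         if i % 2 == 0:  # x
--             out.append(int(box[i]))
--         else:
--             out += [int(box[i]), 2]
--     return out
-- ===== SOURCE B (Python) =====
-- def process(box):
--     out = []
--     it = iter(box)
--     for x in it:
--         y = next(it, None)
--         if y is None:
--             out.append(int(x))
--         else:
--             out += [int(x), int(y), 2]
--     return out
-- ===== Notes on version B (the rewrite author's own statement) =====
-- stated objective: alternative
-- what changed: B consumes the list two elements (x, y) at a time emitting [x, y, 2] per pair (lone trailing x alone), instead of A's index loop branching on i % 2 per element.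
import Mathlib
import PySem

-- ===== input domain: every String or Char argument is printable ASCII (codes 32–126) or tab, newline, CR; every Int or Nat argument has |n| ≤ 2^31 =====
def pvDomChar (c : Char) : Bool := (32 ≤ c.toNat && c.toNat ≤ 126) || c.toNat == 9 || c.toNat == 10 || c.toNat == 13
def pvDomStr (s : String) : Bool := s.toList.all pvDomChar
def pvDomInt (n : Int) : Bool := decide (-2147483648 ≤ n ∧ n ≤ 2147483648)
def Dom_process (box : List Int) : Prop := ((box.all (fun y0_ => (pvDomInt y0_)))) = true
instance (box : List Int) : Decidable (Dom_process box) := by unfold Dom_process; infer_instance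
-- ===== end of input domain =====

-- B consumes the list pairwise, emitting [x, y, 2] per (x, y) pair, instead of A's index loop branching on i % 2.

-- ===== PORT A =====
-- for i in range(len(box)): if i % 2 == 0: out.append(box[i]) else: out += [box[i], 2]
def process (box : List Int) : List Int :=
  (PySem.List.pyRange 0 box.length 1).foldl
    (fun out i =>
      if i % 2 == 0 then out ++ [PySem.List.pyGetD box i 0]
      else out ++ [PySem.List.pyGetD box i 0, 2]) []

-- ===== PORT B =====
-- pair-consuming loop of Source B: structural recursion two elements at a time
def process_alt : List Int → List Int
  | x :: y :: rest => x :: y :: 2 :: process_alt rest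
  | [x] => [x]
  | [] => []

-- ===== PRECONDITION & SPEC =====
def Spec_process (box : List Int) (out : List Int) : Prop := out = process_alt box
instance (box : List Int) (out : List Int) : Decidable (Spec_process box out) := by unfold Spec_process; infer_instance

-- ===== CLAIM (what is proved, stated in full; the proofs are below) =====
def Claim_equal_process : Prop := ∀ (box : List Int), Dom_process box → Spec_process box (process box)

-- ===== LEMMAS AND PROOFS =====

-- the per-index emission of A's loop
def pvEmit (box : List Int) (i : Int) : List Int :=
  if i % 2 == 0 then [PySem.List.pyGetD box i 0] else [PySem.List.pyGetD box i 0, 2]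

lemma process_eq_flatMap (box : List Int) :
    process box = (PySem.List.pyRange 0 box.length 1).flatMap (pvEmit box) := by
  unfold process
  have hfe : (fun (out : List Int) (i : Int) =>
      if i % 2 == 0 then out ++ [PySem.List.pyGetD box i 0]
      else out ++ [PySem.List.pyGetD box i 0, 2])
      = fun (out : List Int) (i : Int) => out ++ pvEmit box i := by
    funext out i
    unfold pvEmit
    by_cases h : i % 2 == 0 <;> simp [h]
  rw [hfe]
  simpa using PySem.List.foldl_append_eq_flatMap (pvEmit box)
      (PySem.List.pyRange 0 box.length 1) ([] : List Int)

lemma pvEmit_shift (x y : Int) (rest : List Int) (k : Nat) :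
    pvEmit (x :: y :: rest) ((2 + k : Nat) : Int) = pvEmit rest (k : Nat) := by
  unfold pvEmit
  have hmod : ((2 + k : Nat) : Int) % 2 = (k : Int) % 2 := by push_cast; omega
  have hget : PySem.List.pyGetD (x :: y :: rest) ((2 + k : Nat) : Int) 0
      = PySem.List.pyGetD rest (k : Nat) 0 := by
    rw [PySem.List.pyGetD_natCast, PySem.List.pyGetD_natCast]
    simp [List.getD, Nat.add_comm 2 k]
  rw [hmod, hget]

lemma flatMap_emit_eq_alt (box : List Int) :
    (PySem.List.pyRange 0 box.length 1).flatMap (pvEmit box) = process_alt box := by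
  induction box using process_alt.induct with
  | case1 x y rest ih =>
      have hlen : ((x :: y :: rest).length : Int) = (rest.length : Int) + 2 := by
        simp; omega
      rw [hlen]
      rw [PySem.List.pyRange_one_cons (by omega)]
      rw [PySem.List.pyRange_one_cons (by omega)]
      norm_num
      have hsplit : PySem.List.pyRange 2 ((rest.length : Int) + 2) 1
          = (List.range rest.length).map (fun k => ((2 + k : Nat) : Int)) := by
        rw [PySem.List.pyRange_one]
        have h2 : (((rest.length : Int) + 2) - 2).toNat = rest.length := by omega
        rw [h2]
        apply List.map_congr_left
        intro k _
        push_cast; ring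
      have hzero : PySem.List.pyRange 0 (rest.length : Int) 1
          = (List.range rest.length).map (fun k => ((k : Nat) : Int)) := by
        rw [PySem.List.pyRange_one]
        simp
      rw [hsplit]
      simp only [List.flatMap_map]
      have he0 : pvEmit (x :: y :: rest) 0 = [x] := by
        simp [pvEmit, PySem.List.pyGetD_zero_cons]
      have he1 : pvEmit (x :: y :: rest) 1 = [y, 2] := by
        unfold pvEmit
        norm_num
        rw [show (1 : Int) = ((1 : Nat) : Int) by norm_num, PySem.List.pyGetD_natCast]
        rfl
      rw [he0, he1]
      have hrest : (List.range rest.length).flatMap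
            (fun k => pvEmit (x :: y :: rest) ((2 + k : Nat) : Int))
          = (List.range rest.length).flatMap (fun k => pvEmit rest (k : Nat)) := by
        apply List.flatMap_congr
        intro k _
        exact pvEmit_shift x y rest k
      have halt : (List.range rest.length).flatMap (fun k => pvEmit rest (k : Nat))
          = process_alt rest := by
        rw [← ih, hzero, List.flatMap_map]
      rw [hrest, halt]
      simp [process_alt]
  | case2 x =>
      have h1 : ((([x] : List Int)).length : Int) = 1 := by simp
      rw [h1, PySem.List.pyRange_one_cons (by omega), PySem.List.pyRange_one_eq_nil (by omega)]
      simp [pvEmit, PySem.List.pyGetD_zero_cons, process_alt]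
  | case3 =>
      simp [process_alt]

-- ===== VERDICT (by name: the statement is the Claim_ definition above) =====
theorem process_spec : Claim_equal_process := by
  intro box _
  unfold Spec_process
  rw [process_eq_flatMap, flatMap_emit_eq_alt]
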